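-- pv_equiv track=rewrite | github.com/zxgsy520/gfungi | scripts/filter_tgs.py | stat_len
-- ===== SOURCE A (Python) =====
-- def stat_len(lengths):
--
--     k10 = 0
--     k20 = 0
--     k40 = 0
--
--     for i in sorted(lengths, reverse=True):
--         if i<10000:
--             break
--         k10 += 1
--         if i >20000:
--             k20 += 1
--         if i >40000:
--             k40 += 1
--     return k10, k20, k40
-- ===== SOURCE B (Python) =====
-- def stat_len(lengths):
--     k10 = 0
--     k20 = 0
--     k40 = 0
--     for i in lengths:
--         if i >= 10000:
--             k10 += 1
--         if i > 20000:
--             k20 += 1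
--         if i > 40000:
--             k40 += 1
--     return k10, k20, k40
-- ===== Notes on version B (the rewrite author's own statement) =====
-- stated objective: simpler
-- what changed: B drops the descending sort and early break entirely and counts the three thresholds in one unsorted pass (valid because sorting descending means the break only skips elements below 10000, which contribute to no counter).
import Mathlib
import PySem

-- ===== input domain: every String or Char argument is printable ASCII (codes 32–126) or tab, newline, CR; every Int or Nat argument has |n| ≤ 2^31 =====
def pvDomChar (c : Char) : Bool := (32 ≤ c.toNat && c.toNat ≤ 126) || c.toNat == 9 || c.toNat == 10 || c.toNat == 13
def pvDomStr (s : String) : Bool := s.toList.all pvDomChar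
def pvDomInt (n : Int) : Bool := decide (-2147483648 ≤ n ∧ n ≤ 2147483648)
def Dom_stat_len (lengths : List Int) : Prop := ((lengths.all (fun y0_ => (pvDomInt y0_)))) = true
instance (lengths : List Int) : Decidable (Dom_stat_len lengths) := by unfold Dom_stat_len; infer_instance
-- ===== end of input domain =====

-- B replaces A's sort-descending-then-break loop by a single unsorted counting pass (objective: simpler).

-- ===== PORT A =====
-- the for-loop with break over the sorted list, carrying (k10, k20, k40)
def statLenLoopA : List Int → Int → Int → Int → Int × Int × Int
  | [], k10, k20, k40 => (k10, k20, k40)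
  | i :: rest, k10, k20, k40 =>
    if i < 10000 then (k10, k20, k40)
    else statLenLoopA rest (k10 + 1)
      (if i > 20000 then k20 + 1 else k20)
      (if i > 40000 then k40 + 1 else k40)

def stat_len (lengths : List Int) : Int × Int × Int :=
  statLenLoopA (PySem.List.sorted lengths (fun x => x) true) 0 0 0

-- ===== PORT B =====
def stat_len_alt (lengths : List Int) : Int × Int × Int :=
  lengths.foldl (fun (acc : Int × Int × Int) i =>
      (acc.1 + (if i ≥ 10000 then 1 else 0),
       acc.2.1 + (if i > 20000 then 1 else 0),
       acc.2.2 + (if i > 40000 then 1 else 0)))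
    (0, 0, 0)

-- ===== PRECONDITION & SPEC =====
def Spec_stat_len (lengths : List Int) (out : Int × Int × Int) : Prop := out = stat_len_alt lengths
instance (lengths : List Int) (out : Int × Int × Int) : Decidable (Spec_stat_len lengths out) := by unfold Spec_stat_len; infer_instance

-- ===== CLAIM (what is proved, stated in full; the proofs are below) =====
def Claim_equal_stat_len : Prop := ∀ (lengths : List Int), Dom_stat_len lengths → Spec_stat_len lengths (stat_len lengths)

-- ===== LEMMAS AND PROOFS =====

def pvC1 (l : List Int) : Int := (l.countP (fun i => 10000 ≤ i) : Int)
def pvC2 (l : List Int) : Int := (l.countP (fun i => 20000 < i) : Int)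
def pvC3 (l : List Int) : Int := (l.countP (fun i => 40000 < i) : Int)

lemma countP_eq_zero_int {p : Int → Bool} {l : List Int} (h : ∀ x ∈ l, ¬ p x) :
    l.countP p = 0 := List.countP_eq_zero.mpr h

lemma loopA_pairwise (l : List Int) (h : l.Pairwise (fun a b => b ≤ a)) :
    ∀ a b c, statLenLoopA l a b c = (a + pvC1 l, b + pvC2 l, c + pvC3 l) := by
  induction l with
  | nil => intro a b c; simp [statLenLoopA, pvC1, pvC2, pvC3]
  | cons i rest ih =>
    intro a b c
    rcases List.pairwise_cons.mp h with ⟨hle, hrest⟩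
    by_cases hi : i < 10000
    · have hall : ∀ x ∈ (i :: rest), x < 10000 := by
        intro x hx
        rcases List.mem_cons.mp hx with rfl | hx
        · exact hi
        · exact lt_of_le_of_lt (hle x hx) hi
      have h1 : (i :: rest).countP (fun j => decide (10000 ≤ j)) = 0 :=
        countP_eq_zero_int (by intro x hx; simpa using not_le.mpr (hall x hx))
      have h2 : (i :: rest).countP (fun j => decide (20000 < j)) = 0 :=
        countP_eq_zero_int (by intro x hx; simpa using not_lt.mpr (le_of_lt (lt_trans (hall x hx) (by norm_num))))
      have h3 : (i :: rest).countP (fun j => decide (40000 < j)) = 0 :=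
        countP_eq_zero_int (by intro x hx; simpa using not_lt.mpr (le_of_lt (lt_trans (hall x hx) (by norm_num))))
      simp [statLenLoopA, hi, pvC1, pvC2, pvC3, h1, h2, h3]
    · have hi' : 10000 ≤ i := not_lt.mp hi
      rw [statLenLoopA, if_neg hi, ih hrest]
      simp [pvC1, pvC2, pvC3, List.countP_cons, hi']
      constructor
      · ring
      constructor
      · by_cases h2 : 20000 < i <;> simp [h2] <;> ring
      · by_cases h3 : 40000 < i <;> simp [h3] <;> ring

lemma alt_foldl (l : List Int) : ∀ a b c,
    l.foldl (fun (acc : Int × Int × Int) i =>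
      (acc.1 + (if i ≥ 10000 then 1 else 0),
       acc.2.1 + (if i > 20000 then 1 else 0),
       acc.2.2 + (if i > 40000 then 1 else 0))) (a, b, c)
    = (a + pvC1 l, b + pvC2 l, c + pvC3 l) := by
  induction l with
  | nil => intro a b c; simp [pvC1, pvC2, pvC3]
  | cons i rest ih =>
    intro a b c
    rw [List.foldl_cons, ih]
    simp only [pvC1, pvC2, pvC3, List.countP_cons]
    refine congrArg₂ _ ?_ (congrArg₂ _ ?_ ?_)
    · by_cases h : 10000 ≤ i <;> simp [h] <;> ring
    · by_cases h : 20000 < i <;> simp [h] <;> ring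
    · by_cases h : 40000 < i <;> simp [h] <;> ring

-- ===== VERDICT (by name: the statement is the Claim_ definition above) =====
theorem stat_len_spec : Claim_equal_stat_len := by
  intro lengths _
  unfold Spec_stat_len stat_len stat_len_alt
  have hperm : (PySem.List.sorted lengths (fun x => x) true).Perm lengths :=
    PySem.List.sorted_perm _ _ _
  have hpw : (PySem.List.sorted lengths (fun x => x) true).Pairwise
      (fun a b => (fun x => x) b ≤ (fun x => x) a) :=
    PySem.List.sorted_pairwise_rev _ _
  rw [loopA_pairwise _ hpw 0 0 0, alt_foldl lengths 0 0 0]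
  simp only [pvC1, pvC2, pvC3, hperm.countP_eq]
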